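-- pv_equiv track=rewrite | github.com/Blezz-tech/MAI-course | информатика/23/1.py | f17
-- ===== SOURCE A (Python) =====
-- def f17(s, p, A, C):
--     if not p:
--         return s
--     c, p = p[0], p[1:]
--
--     if c == '1':
--         return f17(s + 3, p, A, C)
--     if c == '2':
--         return f17(s * A, p, A, C)
--     if c == '3':
--         return f17(s + C, p, A, C)
-- ===== SOURCE B (Python) =====
-- def f17(s, p, A, C):
--     acc = s
--     for c in p:
--         if c == '1':
--             acc += 3
--         elif c == '2':
--             acc *= A
--         elif c == '3':
--             acc += C
--         else:
--             return None
--     return acc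
-- ===== Notes on version B (the rewrite author's own statement) =====
-- stated objective: idiomatic
-- what changed: Replaced the recursive fold (one Python call frame per command character, rebuilding the tail string p[1:] each step) with a single iterative loop over the characters that updates an accumulator in place.
-- outside the precondition, e.g. on f17(0, '4', 2, 3): A returns None, B returns None
import Mathlib
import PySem

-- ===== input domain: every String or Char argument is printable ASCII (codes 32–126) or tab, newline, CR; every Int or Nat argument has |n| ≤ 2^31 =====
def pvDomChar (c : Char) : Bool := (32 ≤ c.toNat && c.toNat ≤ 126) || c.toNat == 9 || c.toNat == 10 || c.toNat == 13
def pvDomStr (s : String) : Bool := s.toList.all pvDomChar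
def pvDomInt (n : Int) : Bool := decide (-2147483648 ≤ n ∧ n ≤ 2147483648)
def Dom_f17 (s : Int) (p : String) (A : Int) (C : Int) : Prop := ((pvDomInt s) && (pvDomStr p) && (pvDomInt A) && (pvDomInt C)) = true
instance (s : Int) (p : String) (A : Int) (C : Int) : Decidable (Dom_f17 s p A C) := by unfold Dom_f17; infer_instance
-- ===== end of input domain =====

-- B replaces A's recursion (with per-step string slicing) by a single iterative pass over the
-- characters with an accumulator; objective: idiomatic. Pre_ excludes inputs where A returns None
-- (a character other than '1','2','3' in p), which is not an Int.


-- ===== PORT A =====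
-- A's recursion on the string, transcribed on the character list (p[0] / p[1:] = head / tail).
-- The fall-through case (character not in '123') is Python's implicit `return None`, outside the
-- Int return type; it is excluded by Pre_f17 and the port returns 0 there.
def f17Rec (s : Int) (p : List Char) (A : Int) (C : Int) : Int :=
  match p with
  | [] => s
  | c :: rest =>
    if c = '1' then f17Rec (s + 3) rest A C
    else if c = '2' then f17Rec (s * A) rest A C
    else if c = '3' then f17Rec (s + C) rest A C
    else 0
def f17 (s : Int) (p : String) (A : Int) (C : Int) : Int := f17Rec s p.toList A C

-- ===== PORT B =====
-- B's loop with early `return None` on a bad character, transcribed as a fold over Option Int;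
-- the None result (excluded by Pre_f17) is rendered as 0.
def f17AltStep (A : Int) (C : Int) (acc : Option Int) (c : Char) : Option Int :=
  acc.bind (fun v =>
    if c = '1' then some (v + 3)
    else if c = '2' then some (v * A)
    else if c = '3' then some (v + C)
    else none)
def f17_alt (s : Int) (p : String) (A : Int) (C : Int) : Int :=
  (p.toList.foldl (f17AltStep A C) (some s)).getD 0

-- ===== PRECONDITION & SPEC =====
-- Pre_ excludes exactly the inputs on which A falls through and returns None (not an Int):
-- some character of p is outside {'1','2','3'}.
def Pre_f17 (s : Int) (p : String) (A : Int) (C : Int) : Prop :=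
  (p.toList.all fun c => c == '1' || c == '2' || c == '3') = true
instance (s : Int) (p : String) (A : Int) (C : Int) : Decidable (Pre_f17 s p A C) := by
  unfold Pre_f17; infer_instance
def pvWitness_f17 : Int × String × Int × Int := (5, "1231", 2, -4)

def Spec_f17 (s : Int) (p : String) (A : Int) (C : Int) (out : Int) : Prop := out = f17_alt s p A C
instance (s : Int) (p : String) (A : Int) (C : Int) (out : Int) : Decidable (Spec_f17 s p A C out) := by
  unfold Spec_f17; infer_instance

-- ===== CLAIM (what is proved, stated in full; the proofs are below) =====
def Claim_equal_f17 : Prop := ∀ (s : Int) (p : String) (A : Int) (C : Int), Dom_f17 s p A C → Pre_f17 s p A C → Spec_f17 s p A C (f17 s p A C)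

-- ===== LEMMAS AND PROOFS =====
theorem f17Rec_eq_fold (A C : Int) (l : List Char) :
    ∀ s : Int, ((l.all fun c => c == '1' || c == '2' || c == '3') = true) →
    f17Rec s l A C = (l.foldl (f17AltStep A C) (some s)).getD 0 := by
  induction l with
  | nil => intro s _; simp [f17Rec]
  | cons c rest ih =>
    intro s h
    simp only [List.all_cons, Bool.and_eq_true] at h
    obtain ⟨hc, hrest⟩ := h
    have hc' : c = '1' ∨ c = '2' ∨ c = '3' :=
      by simpa [decide_eq_true_eq, or_assoc] using hc
    rcases hc' with hc' | hc' | hc' <;> subst hc' <;>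
      simp [f17Rec, List.foldl_cons, f17AltStep, ih _ hrest]

-- ===== VERDICT (by name: the statement is the Claim_ definition above) =====
theorem f17_spec : Claim_equal_f17 := by
  intro s p A C _ hpre
  unfold Spec_f17 f17 f17_alt
  exact f17Rec_eq_fold A C p.toList s hpre
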